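-- pv_equiv track=rewrite | github.com/Aizak5/AOIS | laba1/laba1v2.py | reverse_to_additional
-- ===== SOURCE A (Python) =====
-- def reverse_to_additional(reverse: str) -> str:
--     if reverse[0] == '0':
--         return reverse
--     additional = list(reverse)
--     carry = 1
--     for i in range(len(additional)-1, 0, -1):
--         if additional[i] == '0' and carry == 1:
--             additional[i] = '1'
--             carry = 0
--             break
--         elif additional[i] == '1' and carry == 1:
--             additional[i] = '0'
--     return ''.join(additional)
-- ===== SOURCE B (Python) =====
-- def reverse_to_additional(reverse: str) -> str:
--     if reverse[0] == '0':
--         return reverse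
--     rb = reverse[:0:-1]                 # body (all but the sign char), reversed
--     pre, sep, rest = rb.partition('0')  # chars before the carry stops, the absorbing '0', the rest
--     inc = pre.replace('1', '0') + ('1' if sep else '') + rest
--     return reverse[0] + inc[::-1]
-- ===== Notes on version B (the rewrite author's own statement) =====
-- stated objective: simpler
-- what changed: Replaces the right-to-left index loop with mutable list, carry flag and break by one partition of the reversed magnitude at its first zero bit plus a replace on the carry-absorbed prefix.
import Mathlib
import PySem

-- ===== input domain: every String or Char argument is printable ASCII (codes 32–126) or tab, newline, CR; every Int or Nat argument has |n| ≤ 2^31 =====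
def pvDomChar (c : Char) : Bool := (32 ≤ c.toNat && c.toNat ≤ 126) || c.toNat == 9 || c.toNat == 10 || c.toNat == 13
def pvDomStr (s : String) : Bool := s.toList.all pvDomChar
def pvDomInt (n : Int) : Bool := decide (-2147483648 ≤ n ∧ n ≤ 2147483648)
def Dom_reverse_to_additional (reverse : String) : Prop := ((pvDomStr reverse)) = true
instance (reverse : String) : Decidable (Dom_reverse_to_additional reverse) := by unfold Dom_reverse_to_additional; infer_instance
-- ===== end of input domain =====

-- B replaces A's right-to-left carry/break loop by a partition of the reversed magnitude; objective: simpler.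

-- ===== PORT A =====
-- the for-loop over range(len-1, 0, -1) with carry and break; break = returning without recursing
def raLoop : List Char → Int → List Int → List Char
  | additional, _, [] => additional
  | additional, carry, i :: is =>
    if PySem.List.pyGet? additional i == some '0' && carry == 1 then
      additional.set i.toNat '1'
    else if PySem.List.pyGet? additional i == some '1' && carry == 1 then
      raLoop (additional.set i.toNat '0') carry is
    else
      raLoop additional carry is

def reverse_to_additional (reverse : String) : String :=
  match PySem.Str.pyGet? reverse 0 with
  | none => ""   -- reverse[0] raises IndexError on ""; excluded by Pre_
  | some c =>
    if c == '0' then reverse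
    else
      let additional := reverse.toList
      String.mk (raLoop additional 1 (PySem.List.pyRange ((additional.length : Int) - 1) 0 (-1)))

-- ===== PORT B =====
-- rb.partition('0') with the single-char sep '0' splits at the FIRST '0': hand-ported exactly as
-- takeWhile/dropWhile (≠ '0'); pre.replace('1','0') on single chars is exactly a map.
def altBody (rb : List Char) : List Char :=
  let pre := rb.takeWhile (fun x => x != '0')
  let rest := rb.dropWhile (fun x => x != '0')
  pre.map (fun x => if x == '1' then '0' else x) ++
    (match rest with
     | [] => []          -- sep == '' : no '1' inserted, rest is ''
     | _ :: t => '1' :: t)  -- sep == '0' : contributes '1'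

def reverse_to_additional_alt (reverse : String) : String :=
  match PySem.Str.pyGet? reverse 0 with
  | none => ""   -- reverse[0] raises IndexError on ""; excluded by Pre_
  | some c =>
    if c == '0' then reverse
    else
      let rb := (reverse.toList.drop 1).reverse   -- reverse[:0:-1] = reversed magnitude
      String.mk (c :: (altBody rb).reverse)

-- ===== PRECONDITION & SPEC =====
-- Pre_ excludes only the empty string, on which A raises IndexError at reverse[0].
def Pre_reverse_to_additional (reverse : String) : Prop := reverse ≠ ""
instance (reverse : String) : Decidable (Pre_reverse_to_additional reverse) := by unfold Pre_reverse_to_additional; infer_instance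
def pvWitness_reverse_to_additional : String := "1101"

def Spec_reverse_to_additional (reverse : String) (out : String) : Prop := out = reverse_to_additional_alt reverse
instance (reverse : String) (out : String) : Decidable (Spec_reverse_to_additional reverse out) := by unfold Spec_reverse_to_additional; infer_instance

-- ===== CLAIM (what is proved, stated in full; the proofs are below) =====
def Claim_equal_reverse_to_additional : Prop := ∀ (reverse : String), Dom_reverse_to_additional reverse → Pre_reverse_to_additional reverse → Spec_reverse_to_additional reverse (reverse_to_additional reverse)

-- ===== LEMMAS AND PROOFS =====

-- reference form: propagate the carry along the reversed magnitude
def pvStep : List Char → List Char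
  | [] => []
  | x :: xs => if x = '0' then '1' :: xs
               else if x = '1' then '0' :: pvStep xs
               else x :: pvStep xs

theorem altBody_eq_pvStep (rb : List Char) : altBody rb = pvStep rb := by
  induction rb with
  | nil => rfl
  | cons x xs ih =>
    by_cases h0 : x = '0'
    · subst h0; simp [altBody, pvStep]
    · by_cases h1 : x = '1' <;>
        simp_all [altBody, pvStep]

theorem set_last {α : Type} (l : List α) (x v : α) :
    (l ++ [x]).set l.length v = l ++ [v] := by
  induction l with
  | nil => rfl
  | cons a l ih => simp [ih]

theorem raLoop_append (t : List Char) :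
    ∀ (is : List Int) (l : List Char),
      (∀ i ∈ is, 0 ≤ i ∧ i.toNat < l.length) →
      raLoop (l ++ t) 1 is = raLoop l 1 is ++ t := by
  intro is
  induction is with
  | nil => intro l _; rfl
  | cons i is ih =>
    intro l h
    obtain ⟨hi0, hilt⟩ := h i (by simp)
    have hget : PySem.List.pyGet? (l ++ t) i = PySem.List.pyGet? l i := by
      rw [PySem.List.pyGet?_of_nonneg _ hi0, PySem.List.pyGet?_of_nonneg _ hi0,
        List.getElem?_append_left hilt]
    have hset : ∀ v : Char, (l ++ t).set i.toNat v = l.set i.toNat v ++ t := by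
      intro v; rw [List.set_append]; simp [hilt]
    simp only [raLoop, hget]
    split
    · exact hset _
    · split
      · rw [hset]
        exact ih _ (fun j hj => by simpa using h j (by simp [hj]))
      · exact ih _ (fun j hj => h j (by simp [hj]))

theorem raLoop_eq (c : Char) (body : List Char) :
    raLoop (c :: body) 1 (PySem.List.pyRange (body.length : Int) 0 (-1)) =
      c :: (pvStep body.reverse).reverse := by
  induction body using List.reverseRecOn with
  | nil => simp [PySem.List.pyRange_neg_one_eq_nil, raLoop, pvStep]
  | append_singleton bs x ih =>
    rw [show c :: (bs ++ [x]) = (c :: bs) ++ [x] from rfl]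
    have hcons : PySem.List.pyRange ((bs ++ [x]).length : Int) 0 (-1) =
        ((bs.length : Int) + 1) :: PySem.List.pyRange (bs.length : Int) 0 (-1) := by
      rw [show (((bs ++ [x]).length : Nat) : Int) = (bs.length : Int) + 1 by simp,
        PySem.List.pyRange_neg_one_cons (by positivity)]
      norm_num
    have hget : PySem.List.pyGet? (c :: bs ++ [x]) ((bs.length : Int) + 1) = some x := by
      have h := PySem.List.pyGet?_append_length (pre := c :: bs) (y := x) (ys := ([] : List Char))
      rw [show ((c :: bs).length : Int) = (bs.length : Int) + 1 by simp] at h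
      simpa using h
    have htoNat : ((bs.length : Int) + 1).toNat = bs.length + 1 := by omega
    have hsetx : ∀ v : Char,
        (c :: bs ++ [x]).set ((bs.length : Int) + 1).toNat v = c :: bs ++ [v] := by
      intro v
      rw [htoNat, show (c :: bs ++ [x]) = (c :: bs) ++ [x] by simp,
        show bs.length + 1 = (c :: bs).length by simp, set_last]
    have hmem : ∀ i ∈ PySem.List.pyRange (bs.length : Int) 0 (-1),
        0 ≤ i ∧ i.toNat < (c :: bs).length := fun i hi => by
      have := (PySem.List.mem_pyRange_neg_one).mp hi
      simp only [List.length_cons]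
      constructor <;> omega
    rw [hcons]
    rw [show raLoop ((c :: bs) ++ [x]) 1
          (((bs.length : Int) + 1) :: PySem.List.pyRange (bs.length : Int) 0 (-1)) =
        if (PySem.List.pyGet? ((c :: bs) ++ [x]) ((bs.length : Int) + 1) == some '0'
            && ((1 : Int) == 1)) = true then
          ((c :: bs) ++ [x]).set ((bs.length : Int) + 1).toNat '1'
        else if (PySem.List.pyGet? ((c :: bs) ++ [x]) ((bs.length : Int) + 1) == some '1'
            && ((1 : Int) == 1)) = true then
          raLoop (((c :: bs) ++ [x]).set ((bs.length : Int) + 1).toNat '0') 1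
            (PySem.List.pyRange (bs.length : Int) 0 (-1))
        else
          raLoop ((c :: bs) ++ [x]) 1 (PySem.List.pyRange (bs.length : Int) 0 (-1))
        from rfl]
    rw [hget]
    by_cases h0 : x = '0'
    · subst h0
      rw [if_pos (by simp)]
      rw [hsetx]
      simp [pvStep]
    · by_cases h1 : x = '1'
      · subst h1
        rw [if_neg (by simp), if_pos (by simp), hsetx, raLoop_append _ _ _ hmem, ih]
        simp [pvStep]
      · rw [if_neg (by simp [h0]), if_neg (by simp [h1]), raLoop_append _ _ _ hmem, ih]
        simp [pvStep, h0, h1]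

-- ===== VERDICT (by name: the statement is the Claim_ definition above) =====
theorem reverse_to_additional_spec : Claim_equal_reverse_to_additional := by
  intro s _ hpre
  unfold Spec_reverse_to_additional reverse_to_additional reverse_to_additional_alt
  have hne : s.toList ≠ [] := by
    intro h
    exact hpre (String.toList_inj.mp (by simp [h]))
  obtain ⟨c, body, hcb⟩ := List.exists_cons_of_ne_nil hne
  have hget0 : PySem.Str.pyGet? s 0 = some c := by
    simp [hcb]
  rw [hget0]
  by_cases hc : c == '0'
  · simp [hc]
  · simp only [hc, if_neg, Bool.false_eq_true, not_false_eq_true]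
    rw [hcb]
    have hlen : (((c :: body).length : Nat) : Int) - 1 = (body.length : Int) := by
      simp
    rw [hlen, raLoop_eq, altBody_eq_pvStep]
    simp
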